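-- pv_equiv track=rewrite | github.com/law4percent/Chick-Up | temp/webrtc_peer.py | _apply_bitrate_limit
-- ===== SOURCE A (Python) =====
-- def _apply_bitrate_limit(sdp: str, max_kbps: int = 1500) -> str:
--     lines = sdp.split('\r\n')
--     modified = []
--     video_section = False
--     bitrate_added = False
--
--     for line in lines:
--         if line.startswith('m=video'):
--             video_section = True
--             bitrate_added = False
--         elif line.startswith('m='):
--             video_section = False
--
--         modified.append(line)
--
--         if video_section and line.startswith('a=rtpmap:') and not bitrate_added:
--             modified.append(f'b=AS:{max_kbps}')
--             modified.append(f'b=TIAS:{max_kbps * 1000}')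
--             bitrate_added = True
--
--     return '\r\n'.join(modified)
-- ===== SOURCE B (Python) =====
-- def _apply_bitrate_limit(sdp: str, max_kbps: int = 1500) -> str:
--     lines = sdp.split('\r\n')
--     preamble, sections = _split_sections(lines)
--     out = list(preamble)
--     for seg in sections:
--         if seg[0].startswith('m=video'):
--             seg = _insert_after_rtpmap(seg, max_kbps)
--         out.extend(seg)
--     return '\r\n'.join(out)
--
--
-- def _split_sections(lines):
--     # preamble = lines before the first 'm=' line; each section starts at an 'm=' line
--     i = 0
--     preamble = []
--     while i < len(lines) and not lines[i].startswith('m='):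
--         preamble.append(lines[i])
--         i += 1
--     sections = []
--     while i < len(lines):
--         seg = [lines[i]]
--         i += 1
--         while i < len(lines) and not lines[i].startswith('m='):
--             seg.append(lines[i])
--             i += 1
--         sections.append(seg)
--     return preamble, sections
--
--
-- def _insert_after_rtpmap(seg, max_kbps):
--     for j, line in enumerate(seg):
--         if line.startswith('a=rtpmap:'):
--             return seg[:j + 1] + [f'b=AS:{max_kbps}', f'b=TIAS:{max_kbps * 1000}'] + seg[j + 1:]
--     return seg
-- ===== Notes on version B (the rewrite author's own statement) =====
-- stated objective: alternative
-- what changed: Replaces the single pass with running video_section/bitrate_added flags by an explicit decomposition: split the lines into a preamble plus one section per 'm=' line, insert the two bitrate lines after the first 'a=rtpmap:' line of each 'm=video' section, and concatenate.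
import Mathlib
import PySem

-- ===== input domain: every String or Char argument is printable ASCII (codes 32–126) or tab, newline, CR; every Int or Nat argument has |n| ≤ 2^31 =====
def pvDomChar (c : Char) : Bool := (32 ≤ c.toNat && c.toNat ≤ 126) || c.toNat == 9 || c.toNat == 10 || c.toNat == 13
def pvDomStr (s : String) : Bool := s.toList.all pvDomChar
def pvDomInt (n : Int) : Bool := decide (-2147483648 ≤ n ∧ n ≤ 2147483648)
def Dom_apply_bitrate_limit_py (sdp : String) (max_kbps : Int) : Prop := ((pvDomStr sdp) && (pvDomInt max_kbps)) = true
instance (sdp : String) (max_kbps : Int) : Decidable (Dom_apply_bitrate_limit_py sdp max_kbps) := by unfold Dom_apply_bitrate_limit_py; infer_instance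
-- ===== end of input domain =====

-- B re-implements A by explicit section grouping (preamble + one segment per 'm=' line)
-- instead of A's single pass with running video_section/bitrate_added flags; same cost.

-- ===== PORT A =====
-- the for-loop of A: state (video_section, bitrate_added), building `modified` front-to-back
def aLoop (max_kbps : Int) : List String → Bool → Bool → List String
  | [], _, _ => []
  | line :: rest, video_section, bitrate_added =>
    let vs := if PySem.Str.startswith line "m=video" then true
              else if PySem.Str.startswith line "m=" then false
              else video_section
    let ba := if PySem.Str.startswith line "m=video" then false else bitrate_added
    if vs && PySem.Str.startswith line "a=rtpmap:" && !ba then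
      line :: ("b=AS:" ++ PySem.Int.toStr max_kbps)
           :: ("b=TIAS:" ++ PySem.Int.toStr (max_kbps * 1000))
           :: aLoop max_kbps rest vs true
    else
      line :: aLoop max_kbps rest vs ba

def apply_bitrate_limit_py (sdp : String) (max_kbps : Int) : String :=
  let lines := (PySem.Str.split? sdp "\r\n").getD []   -- sep is non-empty, so split? is `some`
  PySem.Str.join "\r\n" (aLoop max_kbps lines false false)

-- ===== PORT B =====
-- _split_sections: first while-loop (collect preamble / the lines of one section)
def takeNonM : List String → List String × List String
  | [] => ([], [])
  | l :: rest =>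
    if PySem.Str.startswith l "m=" then ([], l :: rest)
    else (l :: (takeNonM rest).1, (takeNonM rest).2)

theorem takeNonM_snd_len (xs : List String) : (takeNonM xs).2.length ≤ xs.length := by
  induction xs with
  | nil => simp [takeNonM]
  | cons l rest ih =>
    simp only [takeNonM]
    split
    · simp
    · simpa using Nat.le_succ_of_le ih

-- _split_sections: second while-loop (one section per 'm=' line)
def splitSections : List String → List (List String)
  | [] => []
  | l :: rest =>
    let pr := takeNonM rest
    (l :: pr.1) :: splitSections pr.2
termination_by ls => ls.length
decreasing_by
  exact Nat.lt_succ_of_le (takeNonM_snd_len rest)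

-- _insert_after_rtpmap: first j with seg[j].startswith('a=rtpmap:'), splice after it
def insertAfterRtpmap (max_kbps : Int) (seg : List String) : List String :=
  match seg.findIdx? (fun l => PySem.Str.startswith l "a=rtpmap:") with
  | some j => seg.take (j + 1)
              ++ [("b=AS:" ++ PySem.Int.toStr max_kbps),
                  ("b=TIAS:" ++ PySem.Int.toStr (max_kbps * 1000))]
              ++ seg.drop (j + 1)
  | none => seg

-- the body of B's `for seg in sections` loop
def processSeg (max_kbps : Int) (seg : List String) : List String :=
  match seg with
  | first :: _ =>
    if PySem.Str.startswith first "m=video" then insertAfterRtpmap max_kbps seg else seg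
  | [] => seg

def apply_bitrate_limit_py_alt (sdp : String) (max_kbps : Int) : String :=
  let lines := (PySem.Str.split? sdp "\r\n").getD []   -- sep is non-empty, so split? is `some`
  let pr := takeNonM lines
  PySem.Str.join "\r\n" (pr.1 ++ (splitSections pr.2).flatMap (processSeg max_kbps))

-- ===== PRECONDITION & SPEC =====
def Spec_apply_bitrate_limit_py (sdp : String) (max_kbps : Int) (out : String) : Prop := out = apply_bitrate_limit_py_alt sdp max_kbps
instance (sdp : String) (max_kbps : Int) (out : String) : Decidable (Spec_apply_bitrate_limit_py sdp max_kbps out) := by unfold Spec_apply_bitrate_limit_py; infer_instance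

-- ===== CLAIM (what is proved, stated in full; the proofs are below) =====
def Claim_equal_apply_bitrate_limit_py : Prop := ∀ (sdp : String) (max_kbps : Int), Dom_apply_bitrate_limit_py sdp max_kbps → Spec_apply_bitrate_limit_py sdp max_kbps (apply_bitrate_limit_py sdp max_kbps)

-- ===== LEMMAS AND PROOFS =====

-- string-prefix facts about the three markers
theorem sw_video_sw_m {l : String} (h : PySem.Str.startswith l "m=video" = true) :
    PySem.Str.startswith l "m=" = true := by
  rw [PySem.Str.startswith_eq] at h ⊢
  rw [PySem.Chars.startswith_iff] at h ⊢
  exact List.IsPrefix.trans (by decide) h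

theorem sw_m_not_rtp {l : String} (h : PySem.Str.startswith l "m=" = true) :
    PySem.Str.startswith l "a=rtpmap:" = false := by
  rw [PySem.Str.startswith_eq, PySem.Chars.startswith_iff] at h
  cases hr : PySem.Str.startswith l "a=rtpmap:" with
  | false => rfl
  | true =>
    rw [PySem.Str.startswith_eq, PySem.Chars.startswith_iff] at hr
    obtain ⟨t1, h1⟩ := h
    obtain ⟨t2, h2⟩ := hr
    rw [← h1] at h2
    have hm : "m=".toList = 'm' :: "=".toList := by decide
    have ha : "a=rtpmap:".toList = 'a' :: "=rtpmap:".toList := by decide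
    rw [hm, ha] at h2
    simp only [List.cons_append, List.cons.injEq] at h2
    exact absurd h2.1 (by decide)

theorem not_m_not_video {l : String} (h : PySem.Str.startswith l "m=" = false) :
    PySem.Str.startswith l "m=video" = false := by
  cases hv : PySem.Str.startswith l "m=video" with
  | false => rfl
  | true => rw [sw_video_sw_m hv] at h; exact absurd h (by decide)

-- `r` is a section boundary: empty or starts with an 'm=' line
def Boundary (r : List String) : Prop :=
  match r with
  | [] => True
  | l :: _ => PySem.Str.startswith l "m=" = true

-- with video_section = False the loop never reads bitrate_added
theorem aLoop_false_ba (mk : Int) (l : List String) (ba ba' : Bool) :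
    aLoop mk l false ba = aLoop mk l false ba' := by
  induction l generalizing ba ba' with
  | nil => rfl
  | cons line rest ih =>
    cases hv : PySem.Str.startswith line "m=video" with
    | true =>
      simp only [aLoop, hv, sw_m_not_rtp (sw_video_sw_m hv)]
      simp
    | false =>
      cases hm : PySem.Str.startswith line "m=" with
      | true =>
        simp only [aLoop, hv, hm]
        simp [ih ba ba']
      | false =>
        simp only [aLoop, hv, hm]
        simp [ih ba ba']

-- at a boundary the whole incoming state is irrelevant
theorem aLoop_boundary (mk : Int) (r : List String) (hb : Boundary r) (vs ba vs' ba' : Bool) :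
    aLoop mk r vs ba = aLoop mk r vs' ba' := by
  match r, hb with
  | [], _ => rfl
  | m :: rest, hm =>
    have hm' : PySem.Str.startswith m "m=" = true := hm
    cases hv : PySem.Str.startswith m "m=video" with
    | true =>
      simp only [aLoop, hv, sw_m_not_rtp hm']
      simp
    | false =>
      simp only [aLoop, hv, hm', sw_m_not_rtp hm']
      simp
      exact aLoop_false_ba mk rest ba ba'

-- preamble lines (no 'm=') pass through unchanged while video_section = False
theorem aLoop_pre (mk : Int) (p r : List String)
    (hp : ∀ l ∈ p, PySem.Str.startswith l "m=" = false) (ba : Bool) :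
    aLoop mk (p ++ r) false ba = p ++ aLoop mk r false ba := by
  induction p with
  | nil => rfl
  | cons l p' ih =>
    have hl := hp l (by simp)
    have hv := not_m_not_video hl
    simp only [List.cons_append, aLoop, hv, hl]
    simp
    exact ih fun x hx => hp x (by simp [hx])

-- after the insertion, the rest of the video section is copied
theorem aLoop_copy (mk : Int) (p r : List String)
    (hp : ∀ l ∈ p, PySem.Str.startswith l "m=" = false) (hb : Boundary r) :
    aLoop mk (p ++ r) true true = p ++ aLoop mk r false false := by
  induction p with
  | nil => simpa using aLoop_boundary mk r hb true true false false
  | cons l p' ih =>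
    have hl := hp l (by simp)
    have hv := not_m_not_video hl
    simp only [List.cons_append, aLoop, hv, hl]
    simp
    exact ih fun x hx => hp x (by simp [hx])

theorem insertAfterRtpmap_cons_not (mk : Int) (l : String) (p : List String)
    (hr : PySem.Str.startswith l "a=rtpmap:" = false) :
    insertAfterRtpmap mk (l :: p) = l :: insertAfterRtpmap mk p := by
  cases h : List.findIdx? (fun s => PySem.Str.startswith s "a=rtpmap:") p with
  | none =>
    simp only [insertAfterRtpmap, List.findIdx?_cons, hr, h]
    simp
  | some j =>
    simp only [insertAfterRtpmap, List.findIdx?_cons, hr, h]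
    simp [List.take_succ_cons, List.drop_succ_cons]

-- inside a video section the loop performs exactly B's splice
theorem aLoop_insert (mk : Int) (p r : List String)
    (hp : ∀ l ∈ p, PySem.Str.startswith l "m=" = false) (hb : Boundary r) :
    aLoop mk (p ++ r) true false = insertAfterRtpmap mk p ++ aLoop mk r false false := by
  induction p with
  | nil => simpa [insertAfterRtpmap] using aLoop_boundary mk r hb true false false false
  | cons l p' ih =>
    have hl := hp l (by simp)
    have hv := not_m_not_video hl
    cases hr : PySem.Str.startswith l "a=rtpmap:" with
    | true =>
      have hfind : insertAfterRtpmap mk (l :: p') =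
          l :: ("b=AS:" ++ PySem.Int.toStr mk)
            :: ("b=TIAS:" ++ PySem.Int.toStr (mk * 1000)) :: p' := by
        simp only [insertAfterRtpmap, List.findIdx?_cons, hr]
        simp
      rw [hfind]
      simp only [List.cons_append, aLoop, hv, hl, hr]
      simp
      exact aLoop_copy mk p' r (fun x hx => hp x (by simp [hx])) hb
    | false =>
      rw [insertAfterRtpmap_cons_not mk l p' hr]
      simp only [List.cons_append, aLoop, hv, hl, hr]
      simp
      exact ih fun x hx => hp x (by simp [hx])

theorem takeNonM_spec (xs : List String) :
    (takeNonM xs).1 ++ (takeNonM xs).2 = xs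
    ∧ (∀ l ∈ (takeNonM xs).1, PySem.Str.startswith l "m=" = false)
    ∧ Boundary (takeNonM xs).2 := by
  induction xs with
  | nil => exact ⟨rfl, by simp [takeNonM], trivial⟩
  | cons l rest ih =>
    obtain ⟨h1, h2, h3⟩ := ih
    cases hm : PySem.Str.startswith l "m=" with
    | true =>
      refine ⟨?_, ?_, ?_⟩ <;> simp only [takeNonM, hm, if_true]
      · simp
      · simp
      · exact hm
    | false =>
      refine ⟨?_, ?_, ?_⟩ <;> simp only [takeNonM, hm, if_false, Bool.false_eq_true]
      · simpa using h1
      · intro x hx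
        simp at hx
        rcases hx with hx | hx
        · subst hx; exact hm
        · exact h2 x hx
      · exact h3

-- main: from any boundary onward A's loop equals B's flatMap over the sections
theorem aLoop_main (mk : Int) (n : Nat) :
    ∀ r, r.length ≤ n → Boundary r →
      aLoop mk r false false = (splitSections r).flatMap (processSeg mk) := by
  induction n with
  | zero =>
    intro r hr _
    have : r = [] := List.eq_nil_of_length_eq_zero (Nat.le_zero.mp hr)
    subst this; simp [splitSections, aLoop]
  | succ n ih =>
    intro r hr hb
    match r, hb with
    | [], _ => simp [splitSections, aLoop]
    | m :: rest, hm =>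
      have hm' : PySem.Str.startswith m "m=" = true := hm
      obtain ⟨h1, h2, h3⟩ := takeNonM_spec rest
      have hlen : (takeNonM rest).2.length ≤ n :=
        le_trans (takeNonM_snd_len rest) (Nat.succ_le_succ_iff.mp hr)
      have hsplit : splitSections (m :: rest) =
          (m :: (takeNonM rest).1) :: splitSections (takeNonM rest).2 := by
        rw [splitSections]
      cases hv : PySem.Str.startswith m "m=video" with
      | true =>
        have hstep : aLoop mk (m :: rest) false false = m :: aLoop mk rest true false := by
          simp only [aLoop, hv, sw_m_not_rtp hm']
          simp
        rw [hstep, hsplit, List.flatMap_cons]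
        have hproc : processSeg mk (m :: (takeNonM rest).1) =
            insertAfterRtpmap mk (m :: (takeNonM rest).1) := by
          simp only [processSeg, hv, if_true]
        rw [hproc, insertAfterRtpmap_cons_not mk m _ (sw_m_not_rtp hm')]
        conv_lhs => rw [← h1]
        rw [aLoop_insert mk _ _ h2 h3, ih _ hlen h3]
        simp
      | false =>
        have hstep : aLoop mk (m :: rest) false false = m :: aLoop mk rest false false := by
          simp only [aLoop, hv, hm']
          simp
        rw [hstep, hsplit, List.flatMap_cons]
        have hproc : processSeg mk (m :: (takeNonM rest).1) = m :: (takeNonM rest).1 := by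
          simp only [processSeg, hv, Bool.false_eq_true, if_false]
        rw [hproc]
        conv_lhs => rw [← h1]
        rw [aLoop_pre mk _ _ h2 false, ih _ hlen h3]
        simp

-- ===== VERDICT (by name: the statement is the Claim_ definition above) =====
theorem apply_bitrate_limit_py_spec : Claim_equal_apply_bitrate_limit_py := by
  intro sdp mk _
  simp only [Spec_apply_bitrate_limit_py, apply_bitrate_limit_py, apply_bitrate_limit_py_alt]
  obtain ⟨h1, h2, h3⟩ := takeNonM_spec ((PySem.Str.split? sdp "\r\n").getD [])
  congr 1
  conv_lhs => rw [← h1]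
  rw [aLoop_pre mk _ _ h2 false, aLoop_main mk _ _ (le_refl _) h3]
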